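-- pv_equiv track=rewrite | github.com/clementnader/cbtc_configuration_checking | prj/src/control_tables/route_overlap_verification/route.py | _find_route_control_table
-- ===== SOURCE A (Python) =====
-- def _find_route_control_table(route_dc_sys: str, route_control_tables: dict[str, dict[str, str]]):
--     for route_control_table, route_val in route_control_tables.items():
--         if _correspondence_route_control_table_dc_sys(route_control_table, route_dc_sys):
--             return route_val, route_control_table
--     for route_control_table, route_val in route_control_tables.items():
--         if _correspondence_route_control_table_dc_sys(route_control_table, route_dc_sys, remove_zero=True):
--             return route_val, route_control_table
--     return {}, ""
--
-- def _correspondence_route_control_table_dc_sys(route_control_table, route_dc_sys, remove_zero: bool = False):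
--     if remove_zero is True:
--         # try removing leading 0 in sig names
--         route_dc_sys = "_".join([sig.removeprefix("0") for sig in route_dc_sys.split("_")])
--         route_control_table = "_".join([sig.removeprefix("0") for sig in route_control_table.split("-")])
--
--     route_dc_sys = "_".join([sig.upper() for sig in route_dc_sys.split("_")][-2:])
--     route_control_table = "_".join([sig.upper() for sig in route_control_table.split("-")]).replace(" ", "")
--     if route_dc_sys == route_control_table:
--         return True
--     # in some projects, the route in DC_SYS is named with 'S' in front of signals name
--     test_route_control_table = "_".join(['S' + sig for sig in route_control_table.split("_")])
--     if route_dc_sys == test_route_control_table: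
--         return True
--     # in some projects, the route in DC_SYS is named with 'f' or 'F' in at the end of route name
--     route_dc_sys = "_".join([sig.removesuffix("F") for sig in route_dc_sys.split("_")])
--     if route_dc_sys == route_control_table or route_dc_sys == test_route_control_table:
--         return True
--
--     return False
-- ===== SOURCE B (Python) =====
-- def _find_route_control_table(route_dc_sys: str, route_control_tables: dict[str, dict[str, str]]):
--     fallback = None
--     for route_control_table, route_val in route_control_tables.items():
--         if _correspondence_route_control_table_dc_sys(route_control_table, route_dc_sys):
--             return route_val, route_control_table
--         if fallback is None and _correspondence_route_control_table_dc_sys(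
--                 route_control_table, route_dc_sys, remove_zero=True):
--             fallback = (route_val, route_control_table)
--     if fallback is not None:
--         return fallback
--     return {}, ""
--
-- def _correspondence_route_control_table_dc_sys(route_control_table, route_dc_sys, remove_zero: bool = False):
--     if remove_zero is True:
--         # try removing leading 0 in sig names
--         route_dc_sys = "_".join([sig.removeprefix("0") for sig in route_dc_sys.split("_")])
--         route_control_table = "_".join([sig.removeprefix("0") for sig in route_control_table.split("-")])
--
--     route_dc_sys = "_".join([sig.upper() for sig in route_dc_sys.split("_")][-2:])
--     route_control_table = "_".join([sig.upper() for sig in route_control_table.split("-")]).replace(" ", "")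
--     if route_dc_sys == route_control_table:
--         return True
--     # in some projects, the route in DC_SYS is named with 'S' in front of signals name
--     test_route_control_table = "_".join(['S' + sig for sig in route_control_table.split("_")])
--     if route_dc_sys == test_route_control_table:
--         return True
--     # in some projects, the route in DC_SYS is named with 'f' or 'F' in at the end of route name
--     route_dc_sys = "_".join([sig.removesuffix("F") for sig in route_dc_sys.split("_")])
--     if route_dc_sys == route_control_table or route_dc_sys == test_route_control_table:
--         return True
--
--     return False
-- ===== Notes on version B (the rewrite author's own statement) =====
-- stated objective: simpler
-- what changed: Single pass over the dict that returns immediately on a normal-correspondence hit and records only the first remove_zero hit as a fallback returned after the loop, instead of A's two full passes; the correspondence helper is unchanged.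
import Mathlib
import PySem

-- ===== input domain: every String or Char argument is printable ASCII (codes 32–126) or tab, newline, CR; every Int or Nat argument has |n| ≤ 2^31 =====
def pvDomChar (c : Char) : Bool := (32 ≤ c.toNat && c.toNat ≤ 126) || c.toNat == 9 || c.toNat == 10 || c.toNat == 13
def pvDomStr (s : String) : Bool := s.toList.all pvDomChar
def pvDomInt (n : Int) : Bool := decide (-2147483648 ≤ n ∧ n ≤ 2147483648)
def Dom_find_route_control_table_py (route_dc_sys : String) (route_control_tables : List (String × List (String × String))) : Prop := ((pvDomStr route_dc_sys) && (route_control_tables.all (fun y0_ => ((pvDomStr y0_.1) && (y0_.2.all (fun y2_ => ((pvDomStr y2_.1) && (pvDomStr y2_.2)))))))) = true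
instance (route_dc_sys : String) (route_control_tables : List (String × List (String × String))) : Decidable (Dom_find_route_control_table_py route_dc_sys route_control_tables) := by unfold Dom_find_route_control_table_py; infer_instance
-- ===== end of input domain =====

-- B replaces A's two full passes with one pass that returns on a normal hit and keeps the
-- first remove_zero hit as a fallback; the correspondence helper is shared unchanged.

-- ===== PORT A =====
-- s.split(sep) for a nonempty literal sep (split? is some there; exact)
def pvSplit (s sep : String) : List String := (PySem.Str.split? s sep).getD []

-- str.removeprefix / str.removesuffix (exact; PySem has no primitive for them)
def pvRmPrefix (s p : String) : String :=
  if PySem.Str.startswith s p then String.ofList (s.toList.drop p.toList.length) else s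

def pvRmSuffix (s p : String) : String :=
  if PySem.Str.endswith s p then String.ofList (s.toList.take (s.toList.length - p.toList.length)) else s

-- _correspondence_route_control_table_dc_sys, step for step (identical in A's and B's Python)
def pvCorr (route_control_table route_dc_sys : String) (remove_zero : Bool) : Bool :=
  let rds0 := if remove_zero then
      PySem.Str.join "_" ((pvSplit route_dc_sys "_").map (fun sig => pvRmPrefix sig "0"))
    else route_dc_sys
  let rct0 := if remove_zero then
      PySem.Str.join "_" ((pvSplit route_control_table "-").map (fun sig => pvRmPrefix sig "0"))
    else route_control_table
  let rds1 := PySem.Str.join "_"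
      (PySem.List.slice ((pvSplit rds0 "_").map PySem.Str.upper) (some (-2)) none)
  let rct1 := PySem.Str.replace
      (PySem.Str.join "_" ((pvSplit rct0 "-").map PySem.Str.upper)) " " ""
  if rds1 == rct1 then true
  else
    let test := PySem.Str.join "_"
        ((pvSplit rct1 "_").map (fun sig => String.ofList ('S' :: sig.toList)))
    if rds1 == test then true
    else
      let rds2 := PySem.Str.join "_" ((pvSplit rds1 "_").map (fun sig => pvRmSuffix sig "F"))
      if rds2 == rct1 || rds2 == test then true else false

-- A's first for-loop (normal correspondence, early return)
def pvLoopA1 (route_dc_sys : String) : List (String × List (String × String)) → Option ((List (String × String)) × String)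
  | [] => none
  | (k, v) :: rest => if pvCorr k route_dc_sys false then some (v, k) else pvLoopA1 route_dc_sys rest

-- A's second for-loop (remove_zero correspondence, early return)
def pvLoopA2 (route_dc_sys : String) : List (String × List (String × String)) → Option ((List (String × String)) × String)
  | [] => none
  | (k, v) :: rest => if pvCorr k route_dc_sys true then some (v, k) else pvLoopA2 route_dc_sys rest

def find_route_control_table_py (route_dc_sys : String) (route_control_tables : List (String × List (String × String))) : (List (String × String)) × String :=
  match pvLoopA1 route_dc_sys route_control_tables with
  | some p => p
  | none =>
    match pvLoopA2 route_dc_sys route_control_tables with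
    | some p => p
    | none => ([], "")

-- ===== PORT B =====
-- B's single loop carrying the fallback candidate
def pvLoopB (route_dc_sys : String) (fallback : Option ((List (String × String)) × String)) : List (String × List (String × String)) → (List (String × String)) × String
  | [] => fallback.getD ([], "")
  | (k, v) :: rest =>
    if pvCorr k route_dc_sys false then (v, k)
    else pvLoopB route_dc_sys
      (if fallback.isNone && pvCorr k route_dc_sys true then some (v, k) else fallback) rest

def find_route_control_table_py_alt (route_dc_sys : String) (route_control_tables : List (String × List (String × String))) : (List (String × String)) × String :=
  pvLoopB route_dc_sys none route_control_tables

-- ===== PRECONDITION & SPEC =====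
def Spec_find_route_control_table_py (route_dc_sys : String) (route_control_tables : List (String × List (String × String))) (out : (List (String × String)) × String) : Prop := out = find_route_control_table_py_alt route_dc_sys route_control_tables
instance (route_dc_sys : String) (route_control_tables : List (String × List (String × String))) (out : (List (String × String)) × String) : Decidable (Spec_find_route_control_table_py route_dc_sys route_control_tables out) := by unfold Spec_find_route_control_table_py; infer_instance

-- ===== CLAIM (what is proved, stated in full; the proofs are below) =====
def Claim_equal_find_route_control_table_py : Prop := ∀ (route_dc_sys : String) (route_control_tables : List (String × List (String × String))), Dom_find_route_control_table_py route_dc_sys route_control_tables → Spec_find_route_control_table_py route_dc_sys route_control_tables (find_route_control_table_py route_dc_sys route_control_tables)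

-- ===== LEMMAS AND PROOFS =====

-- Invariant of B's single loop: it is A's first pass, with the fallback (or A's second pass
-- when no fallback was recorded yet) behind it.
theorem pvLoopB_eq (route_dc_sys : String) (l : List (String × List (String × String)))
    (fb : Option ((List (String × String)) × String)) :
    pvLoopB route_dc_sys fb l =
      match pvLoopA1 route_dc_sys l with
      | some p => p
      | none => fb.getD ((pvLoopA2 route_dc_sys l).getD ([], "")) := by
  induction l generalizing fb with
  | nil => simp [pvLoopB, pvLoopA1, pvLoopA2]
  | cons kv rest ih =>
    obtain ⟨k, v⟩ := kv
    by_cases h1 : pvCorr k route_dc_sys false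
    · simp [pvLoopB, pvLoopA1, h1]
    · cases fb with
      | some p => simp [pvLoopB, pvLoopA1, pvLoopA2, h1, ih]
      | none =>
        by_cases h2 : pvCorr k route_dc_sys true <;>
          simp [pvLoopB, pvLoopA1, pvLoopA2, h1, h2, ih]

-- ===== VERDICT (by name: the statement is the Claim_ definition above) =====
theorem find_route_control_table_py_spec : Claim_equal_find_route_control_table_py := by
  intro route_dc_sys route_control_tables _
  unfold Spec_find_route_control_table_py find_route_control_table_py find_route_control_table_py_alt
  rw [pvLoopB_eq]
  cases pvLoopA1 route_dc_sys route_control_tables <;>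
    cases h2 : pvLoopA2 route_dc_sys route_control_tables <;> simp
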